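-- pv_equiv track=rewrite | github.com/elysenko/meeting-analyzer | services/export.py | _split_markdown_tables
-- ===== SOURCE A (Python) =====
-- def _split_markdown_tables(text: str) -> list[tuple[str, str]]:
--     """Split markdown text into ('text', content) and ('table', rows) chunks."""
--     lines = text.split("\n")
--     chunks: list[tuple[str, str]] = []
--     current_text: list[str] = []
--     current_table: list[str] = []
--
--     def flush_text():
--         if current_text:
--             chunks.append(("text", "\n".join(current_text)))
--             current_text.clear()
--
--     def flush_table():
--         if current_table:
--             chunks.append(("table", "\n".join(current_table)))
--             current_table.clear()
--
--     for line in lines: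
--         stripped = line.strip()
--         if stripped.startswith("|") and stripped.endswith("|"):
--             if not current_table:
--                 flush_text()
--             current_table.append(stripped)
--         else:
--             if current_table:
--                 flush_table()
--             current_text.append(line)
--     flush_text()
--     flush_table()
--     return chunks
-- ===== SOURCE B (Python) =====
-- def _split_markdown_tables(text: str) -> list[tuple[str, str]]:
--     """Split markdown text into ('text', content) and ('table', rows) chunks."""
--     chunks: list[tuple[str, str]] = []  # kept in reverse order while building
--     for line in reversed(text.split("\n")):
--         s = line.strip()
--         if s.startswith("|") and s.endswith("|"):
--             kind, content = "table", s
--         else: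
--             kind, content = "text", line
--         if chunks and chunks[-1][0] == kind:
--             # merge into the chunk built from the lines just after this one
--             chunks[-1] = (kind, content + "\n" + chunks[-1][1])
--         else:
--             chunks.append((kind, content))
--     chunks.reverse()
--     return chunks
-- ===== Notes on version B (the rewrite author's own statement) =====
-- stated objective: alternative
-- what changed: Replaces A's forward state machine with two line buffers and flush closures by a buffer-free backward pass that builds the chunk list right-to-left, merging each classified line into the head chunk of the already-built suffix or starting a new chunk.
import Mathlib
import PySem

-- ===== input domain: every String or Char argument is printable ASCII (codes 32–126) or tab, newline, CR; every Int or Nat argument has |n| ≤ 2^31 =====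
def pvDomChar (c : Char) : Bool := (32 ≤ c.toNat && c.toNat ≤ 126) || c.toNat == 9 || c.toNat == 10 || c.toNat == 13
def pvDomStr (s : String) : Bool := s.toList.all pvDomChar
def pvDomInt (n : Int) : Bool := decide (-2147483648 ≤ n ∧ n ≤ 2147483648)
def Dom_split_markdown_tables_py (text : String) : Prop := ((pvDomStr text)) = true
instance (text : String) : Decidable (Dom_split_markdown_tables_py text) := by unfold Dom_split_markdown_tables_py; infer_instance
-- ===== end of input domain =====

-- B replaces A's forward two-buffer flush state machine by a buffer-free backward pass
-- that merges each line into the head chunk of the already-built suffix (objective: alternative);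
-- return values proved equal.


-- ===== PORT A =====
-- text.split("\n"); split? is total here since the separator is non-empty
def pvLines (text : String) : List String := (PySem.Str.split? text "\n").getD []

-- A's for-loop over lines with state (chunks, current_text, current_table),
-- including the two final flushes (flush_text then flush_table).
def pvLoopA : List String → List (String × String) → List String → List String → List (String × String)
  | [], chunks, ct, tb =>
      let chunks := if ct ≠ [] then chunks ++ [("text", PySem.Str.join "\n" ct)] else chunks
      if tb ≠ [] then chunks ++ [("table", PySem.Str.join "\n" tb)] else chunks
  | l :: ls, chunks, ct, tb =>
      let stripped := PySem.Str.strip l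
      if PySem.Str.startswith stripped "|" && PySem.Str.endswith stripped "|" then
        if tb = [] then
          -- flush_text
          let chunks := if ct ≠ [] then chunks ++ [("text", PySem.Str.join "\n" ct)] else chunks
          pvLoopA ls chunks [] (tb ++ [stripped])
        else
          pvLoopA ls chunks ct (tb ++ [stripped])
      else
        if tb ≠ [] then
          -- flush_table
          pvLoopA ls (chunks ++ [("table", PySem.Str.join "\n" tb)]) (ct ++ [l]) []
        else
          pvLoopA ls chunks (ct ++ [l]) tb

def split_markdown_tables_py (text : String) : List (String × String) :=
  pvLoopA (pvLines text) [] [] []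

-- ===== PORT B =====
-- classify a line: ("table", stripped form) or ("text", original line)
def pvKC (l : String) : String × String :=
  let s := PySem.Str.strip l
  if PySem.Str.startswith s "|" && PySem.Str.endswith s "|" then ("table", s) else ("text", l)

-- one backward step: merge the classified line into the head chunk of the
-- suffix result if the kinds agree, else start a new chunk in front
def pvMerge (kc : String × String) : List (String × String) → List (String × String)
  | [] => [kc]
  | (k, s) :: t => if k = kc.1 then (kc.1, kc.2 ++ "\n" ++ s) :: t else kc :: (k, s) :: t

-- Source B's reversed-iteration loop with a final reverse IS this right fold
def split_markdown_tables_py_alt (text : String) : List (String × String) :=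
  (pvLines text).foldr (fun l acc => pvMerge (pvKC l) acc) []

-- ===== PRECONDITION & SPEC =====
def Spec_split_markdown_tables_py (text : String) (out : List (String × String)) : Prop := out = split_markdown_tables_py_alt text
instance (text : String) (out : List (String × String)) : Decidable (Spec_split_markdown_tables_py text out) := by unfold Spec_split_markdown_tables_py; infer_instance

-- ===== CLAIM (what is proved, stated in full; the proofs are below) =====
def Claim_equal_split_markdown_tables_py : Prop := ∀ (text : String), Dom_split_markdown_tables_py text → Spec_split_markdown_tables_py text (split_markdown_tables_py text)

-- ===== LEMMAS AND PROOFS =====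

-- proof-only bridge: the maximal-run (groupby-style) characterisation both ports satisfy
def pvIsTab (l : String) : Bool :=
  PySem.Str.startswith (PySem.Str.strip l) "|" && PySem.Str.endswith (PySem.Str.strip l) "|"

def pvRunsB : List String → List (String × String)
  | [] => []
  | l :: ls =>
      let k := pvIsTab l
      let grp := l :: ls.takeWhile (fun x => pvIsTab x == k)
      let rest := ls.dropWhile (fun x => pvIsTab x == k)
      (if k then ("table", PySem.Str.join "\n" (grp.map PySem.Str.strip))
       else ("text", PySem.Str.join "\n" grp)) :: pvRunsB rest
  termination_by ls => ls.length
  decreasing_by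
    simpa using Nat.lt_succ_of_le (List.length_dropWhile_le _ _)

theorem pvLoopA_step_tab_nil {l : String} (ls : List String) (ch : List (String × String))
    (ct : List String) (h : pvIsTab l = true) :
    pvLoopA (l :: ls) ch ct [] =
      pvLoopA ls (if ct ≠ [] then ch ++ [("text", PySem.Str.join "\n" ct)] else ch) [] [PySem.Str.strip l] := by
  simp only [pvIsTab] at h
  simp only [pvLoopA, h, List.nil_append]
  simp

theorem pvLoopA_step_tab_cons {l : String} (ls : List String) (ch : List (String × String))
    (ct tb : List String) (h : pvIsTab l = true) (htb : tb ≠ []) :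
    pvLoopA (l :: ls) ch ct tb = pvLoopA ls ch ct (tb ++ [PySem.Str.strip l]) := by
  simp only [pvIsTab] at h
  simp only [pvLoopA, h]
  simp [htb]

theorem pvLoopA_step_text_flush {l : String} (ls : List String) (ch : List (String × String))
    (ct tb : List String) (h : pvIsTab l = false) (htb : tb ≠ []) :
    pvLoopA (l :: ls) ch ct tb =
      pvLoopA ls (ch ++ [("table", PySem.Str.join "\n" tb)]) (ct ++ [l]) [] := by
  simp only [pvIsTab] at h
  simp only [pvLoopA, h]
  simp [htb]

theorem pvLoopA_step_text_nil {l : String} (ls : List String) (ch : List (String × String))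
    (ct : List String) (h : pvIsTab l = false) :
    pvLoopA (l :: ls) ch ct [] = pvLoopA ls ch (ct ++ [l]) [] := by
  simp only [pvIsTab] at h
  simp only [pvLoopA, h]
  simp

-- the chunks parameter is a pure accumulator
theorem pvLoopA_acc (ls : List String) : ∀ (ch : List (String × String)) (ct tb : List String),
    pvLoopA ls ch ct tb = ch ++ pvLoopA ls [] ct tb := by
  induction ls with
  | nil =>
      intro ch ct tb
      simp only [pvLoopA]
      split_ifs <;> simp
  | cons l ls ih =>
      intro ch ct tb
      by_cases hk : pvIsTab l
      · by_cases htb : tb = []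
        · subst htb
          rw [pvLoopA_step_tab_nil ls ch ct hk, pvLoopA_step_tab_nil ls [] ct hk,
            ih, ih (if ct ≠ [] then [] ++ [("text", PySem.Str.join "\n" ct)] else [])]
          split_ifs <;> simp
        · rw [pvLoopA_step_tab_cons ls ch ct tb hk htb,
            pvLoopA_step_tab_cons ls [] ct tb hk htb, ih]
      · have hk' : pvIsTab l = false := by simpa using hk
        by_cases htb : tb = []
        · subst htb
          rw [pvLoopA_step_text_nil ls ch ct hk', pvLoopA_step_text_nil ls [] ct hk', ih]
        · rw [pvLoopA_step_text_flush ls ch ct tb hk' htb,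
            pvLoopA_step_text_flush ls [] ct tb hk' htb, ih,
            ih ([] ++ [("table", PySem.Str.join "\n" tb)])]
          simp

-- a pending text buffer absorbs the maximal non-table run, then is flushed
theorem pvLoopA_text (ls : List String) : ∀ (ct : List String), ct ≠ [] →
    pvLoopA ls [] ct [] =
      ("text", PySem.Str.join "\n" (ct ++ ls.takeWhile (fun x => !pvIsTab x))) ::
        pvLoopA (ls.dropWhile (fun x => !pvIsTab x)) [] [] [] := by
  induction ls with
  | nil =>
      intro ct h
      simp only [pvLoopA, if_pos h, List.takeWhile_nil, List.dropWhile_nil, List.append_nil]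
      simp
  | cons l ls ih =>
      intro ct h
      by_cases hk : pvIsTab l
      · rw [pvLoopA_step_tab_nil ls [] ct hk]
        rw [if_pos h, pvLoopA_acc]
        rw [List.takeWhile_cons, List.dropWhile_cons]
        simp only [hk, Bool.not_true, Bool.false_eq_true, if_false]
        rw [pvLoopA_step_tab_nil ls [] [] hk]
        simp
      · have hk' : pvIsTab l = false := by simpa using hk
        rw [pvLoopA_step_text_nil ls [] ct hk', ih (ct ++ [l]) (by simp)]
        rw [List.takeWhile_cons, List.dropWhile_cons]
        simp [hk']

-- a pending table buffer absorbs the maximal table run, then is flushed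
theorem pvLoopA_table (ls : List String) : ∀ (tb : List String), tb ≠ [] →
    pvLoopA ls [] [] tb =
      ("table", PySem.Str.join "\n" (tb ++ (ls.takeWhile (fun x => pvIsTab x)).map PySem.Str.strip)) ::
        pvLoopA (ls.dropWhile (fun x => pvIsTab x)) [] [] [] := by
  induction ls with
  | nil =>
      intro tb h
      simp only [pvLoopA, if_neg (by simp : ¬ ([] : List String) ≠ []), if_pos h,
        List.takeWhile_nil, List.dropWhile_nil, List.map_nil, List.append_nil]
      simp
  | cons l ls ih =>
      intro tb h
      by_cases hk : pvIsTab l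
      · rw [pvLoopA_step_tab_cons ls [] [] tb hk h, ih (tb ++ [PySem.Str.strip l]) (by simp)]
        rw [List.takeWhile_cons, List.dropWhile_cons]
        simp [hk]
      · have hk' : pvIsTab l = false := by simpa using hk
        rw [pvLoopA_step_text_flush ls [] [] tb hk' h, pvLoopA_acc]
        rw [List.takeWhile_cons, List.dropWhile_cons]
        simp only [hk', Bool.false_eq_true, if_false]
        rw [pvLoopA_step_text_nil ls [] [] hk']
        simp

theorem pvLoopA_eq_runsB (ls : List String) : pvLoopA ls [] [] [] = pvRunsB ls := by
  match ls with
  | [] => simp [pvLoopA, pvRunsB]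
  | l :: ls =>
      rw [pvRunsB]
      by_cases hk : pvIsTab l
      · rw [pvLoopA_step_tab_nil ls [] [] hk]
        rw [if_neg (by simp : ¬ ([] : List String) ≠ [])]
        rw [pvLoopA_table ls [PySem.Str.strip l] (by simp),
          pvLoopA_eq_runsB (ls.dropWhile (fun x => pvIsTab x))]
        simp [hk]
      · have hk' : pvIsTab l = false := by simpa using hk
        rw [pvLoopA_step_text_nil ls [] [] hk', List.nil_append]
        rw [pvLoopA_text ls [l] (by simp),
          pvLoopA_eq_runsB (ls.dropWhile (fun x => !pvIsTab x))]
        simp [hk']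
  termination_by ls.length
  decreasing_by
    all_goals simpa using Nat.lt_succ_of_le (List.length_dropWhile_le _ _)

-- ===== B-side lemmas: the backward merge fold also equals the run characterisation =====

def pvFoldB (ls : List String) : List (String × String) :=
  ls.foldr (fun l acc => pvMerge (pvKC l) acc) []

def pvTag (k : Bool) : String := if k then "table" else "text"
def pvContent (k : Bool) (l : String) : String := if k then PySem.Str.strip l else l

theorem pvContent_true : pvContent true = PySem.Str.strip := by
  funext l; simp [pvContent]

theorem pvContent_false : pvContent false = id := by
  funext l; simp [pvContent]

theorem pvKC_eq (l : String) : pvKC l = (pvTag (pvIsTab l), pvContent (pvIsTab l) l) := by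
  simp only [pvKC, pvIsTab, pvTag, pvContent]
  split_ifs <;> rfl

theorem pvTag_inj {a b : Bool} (h : pvTag a = pvTag b) : a = b := by
  cases a <;> cases b <;> simp_all [pvTag]

theorem pvFoldB_cons (l : String) (ls : List String) :
    pvFoldB (l :: ls) = pvMerge (pvKC l) (pvFoldB ls) := rfl

theorem pvMerge_cons (k1 c k s : String) (t : List (String × String)) :
    pvMerge (k1, c) ((k, s) :: t) =
      if k = k1 then (k1, c ++ "\n" ++ s) :: t else (k1, c) :: (k, s) :: t := rfl

theorem pvFoldB_head_tag (x : String) (xs : List String) :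
    ∃ s t, pvFoldB (x :: xs) = (pvTag (pvIsTab x), s) :: t := by
  rw [pvFoldB_cons, pvKC_eq]
  cases h : pvFoldB xs with
  | nil => exact ⟨_, _, rfl⟩
  | cons p t =>
      obtain ⟨k, s⟩ := p
      rw [pvMerge_cons]
      by_cases hk : k = pvTag (pvIsTab x)
      · rw [if_pos hk]; exact ⟨_, _, rfl⟩
      · rw [if_neg hk]; exact ⟨_, _, rfl⟩

-- "\n".join of a singleton / of a nonempty tail
theorem pvJoin_single (a : String) : PySem.Str.join "\n" [a] = a := by
  apply String.ext
  show (PySem.Str.join "\n" [a]).toList = a.toList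
  simp [PySem.Str.toList_join, PySem.Chars.join_singleton]

theorem pvJoin_cons (a : String) (rest : List String) (h : rest ≠ []) :
    PySem.Str.join "\n" (a :: rest) = a ++ "\n" ++ PySem.Str.join "\n" rest := by
  cases rest with
  | nil => exact absurd rfl h
  | cons b rs =>
      apply String.ext
      show (PySem.Str.join "\n" (a :: b :: rs)).toList = _
      simp [PySem.Str.toList_join, PySem.Chars.join_cons_cons]

theorem pvDropWhile_head {α : Type} (p : α → Bool) :
    ∀ (ls : List α) (y : α) (ys : List α), ls.dropWhile p = y :: ys → p y = false := by
  intro ls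
  induction ls with
  | nil => intro y ys h; simp at h
  | cons x xs ih =>
      intro y ys h
      rw [List.dropWhile_cons] at h
      by_cases hp : p x
      · rw [if_pos hp] at h; exact ih y ys h
      · rw [if_neg hp] at h
        cases h
        simpa using hp

-- one maximal run of key k folds to a single chunk in front of the rest's fold
theorem pvFoldB_run (k : Bool) :
    ∀ (g : List String), g ≠ [] → (∀ x ∈ g, pvIsTab x = k) →
    ∀ (rest : List String), (∀ y ys, rest = y :: ys → pvIsTab y ≠ k) →
    pvFoldB (g ++ rest) = (pvTag k, PySem.Str.join "\n" (g.map (pvContent k))) :: pvFoldB rest := by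
  intro g
  induction g with
  | nil => intro h; exact absurd rfl h
  | cons x g' ih =>
      intro _ hall rest hrest
      have hx : pvIsTab x = k := hall x (by simp)
      by_cases hg'ne : g' = []
      · subst hg'ne
        have hstep : pvFoldB ([x] ++ rest) = pvMerge (pvKC x) (pvFoldB rest) := rfl
        rw [hstep, pvKC_eq, hx]
        rcases rest with _ | ⟨y, ys⟩
        · show [(pvTag k, pvContent k x)] = _
          rw [List.map_cons, List.map_nil, pvJoin_single]
          rfl
        · have hy : pvIsTab y ≠ k := hrest y ys rfl
          obtain ⟨s, t, hf⟩ := pvFoldB_head_tag y ys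
          have hne : pvTag (pvIsTab y) ≠ pvTag k := fun hc => hy (pvTag_inj hc)
          rw [hf, pvMerge_cons]
          rw [if_neg hne, List.map_cons, List.map_nil, pvJoin_single]
      · have hstep : pvFoldB ((x :: g') ++ rest) = pvMerge (pvKC x) (pvFoldB (g' ++ rest)) := rfl
        rw [hstep, ih hg'ne (fun y hy => hall y (List.mem_cons_of_mem x hy)) rest hrest,
          pvKC_eq, hx]
        rw [pvMerge_cons, if_pos rfl, List.map_cons,
          pvJoin_cons (pvContent k x) (g'.map (pvContent k)) (by simp [hg'ne])]

theorem pvRunsB_eq_foldB (ls : List String) : pvRunsB ls = pvFoldB ls := by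
  match ls with
  | [] => simp [pvRunsB, pvFoldB]
  | l :: ls =>
      rw [pvRunsB]
      have hgrp : ∀ x ∈ l :: ls.takeWhile (fun x => pvIsTab x == pvIsTab l), pvIsTab x = pvIsTab l := by
        intro x hx
        rcases List.mem_cons.mp hx with h | h
        · rw [h]
        · simpa using List.mem_takeWhile_imp h
      have hrest : ∀ y ys, ls.dropWhile (fun x => pvIsTab x == pvIsTab l) = y :: ys →
          pvIsTab y ≠ pvIsTab l := by
        intro y ys h hc
        have := pvDropWhile_head (fun x => pvIsTab x == pvIsTab l) ls y ys h
        simp [hc] at this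
      have hsplit : l :: ls = (l :: ls.takeWhile (fun x => pvIsTab x == pvIsTab l)) ++
          ls.dropWhile (fun x => pvIsTab x == pvIsTab l) := by
        simp [List.takeWhile_append_dropWhile]
      have hrun := pvFoldB_run (pvIsTab l) (l :: ls.takeWhile (fun x => pvIsTab x == pvIsTab l))
        (by simp) hgrp (ls.dropWhile (fun x => pvIsTab x == pvIsTab l)) hrest
      rw [pvRunsB_eq_foldB (ls.dropWhile (fun x => pvIsTab x == pvIsTab l))]
      conv_rhs => rw [hsplit]
      rw [hrun]
      by_cases hk : pvIsTab l
      · simp [hk, pvTag, pvContent_true]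
      · have hk' : pvIsTab l = false := by simpa using hk
        simp [hk', pvTag, pvContent_false]
  termination_by ls.length
  decreasing_by
    all_goals simpa using Nat.lt_succ_of_le (List.length_dropWhile_le _ _)

-- ===== VERDICT (by name: the statement is the Claim_ definition above) =====
theorem split_markdown_tables_py_spec : Claim_equal_split_markdown_tables_py := by
  intro text _
  show _ = _
  unfold split_markdown_tables_py split_markdown_tables_py_alt
  rw [pvLoopA_eq_runsB, pvRunsB_eq_foldB]
  rfl
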